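-- pv_equiv track=rewrite | github.com/1054/Crab.Toolkit.JWST | bin/go-jwst-query-by-program-id-obs-num.py | get_instrument_from_detector_name
-- ===== SOURCE A (Python) =====
-- def get_instrument_from_detector_name(detector_name):
--     instrument_detector_name = {
--         'NIRCam': ['nrca1', 'nrca2', 'nrca3', 'nrca4', 'nrcalong', 'nrcb1', 'nrcb2', 'nrcb3', 'nrcb4', 'nrcblong'],
--         'MIRI': ['mirimage'],
--     }
--     for instrument in instrument_detector_name:
--         if detector_name in instrument_detector_name[instrument]:
--             return instrument
--     return None
-- ===== SOURCE B (Python) =====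
-- _DETECTOR_TO_INSTRUMENT = {
--     'nrca1': 'NIRCam', 'nrca2': 'NIRCam', 'nrca3': 'NIRCam', 'nrca4': 'NIRCam',
--     'nrcalong': 'NIRCam', 'nrcb1': 'NIRCam', 'nrcb2': 'NIRCam', 'nrcb3': 'NIRCam',
--     'nrcb4': 'NIRCam', 'nrcblong': 'NIRCam',
--     'mirimage': 'MIRI',
-- }
--
-- def get_instrument_from_detector_name(detector_name):
--     return _DETECTOR_TO_INSTRUMENT.get(detector_name)
-- ===== Notes on version B (the rewrite author's own statement) =====
-- stated objective: idiomatic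
-- what changed: Replaced the loop over instruments with an inner list-membership scan by a single precomputed flat detector->instrument dict and one direct .get lookup.
import Mathlib
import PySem

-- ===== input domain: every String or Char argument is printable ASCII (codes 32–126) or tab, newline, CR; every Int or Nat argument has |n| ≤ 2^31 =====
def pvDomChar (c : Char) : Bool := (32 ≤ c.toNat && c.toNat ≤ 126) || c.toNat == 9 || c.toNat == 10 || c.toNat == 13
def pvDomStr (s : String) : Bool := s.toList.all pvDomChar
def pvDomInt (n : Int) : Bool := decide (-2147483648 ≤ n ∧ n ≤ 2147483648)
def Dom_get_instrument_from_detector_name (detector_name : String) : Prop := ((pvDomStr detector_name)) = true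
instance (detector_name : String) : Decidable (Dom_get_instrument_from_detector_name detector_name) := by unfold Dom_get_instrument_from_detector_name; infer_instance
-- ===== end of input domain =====

-- B replaces the loop over instruments + inner list-membership scan with one flat
-- detector->instrument dict and a single keyed lookup (idiomatic; same behaviour).


-- ===== PORT A =====
-- A's dict literal: instrument -> list of detector names, insertion order
def pvInstrumentDetectorName : List (String × List String) :=
  [("NIRCam", ["nrca1", "nrca2", "nrca3", "nrca4", "nrcalong",
               "nrcb1", "nrcb2", "nrcb3", "nrcb4", "nrcblong"]),
   ("MIRI", ["mirimage"])]

-- the 'for instrument in …: if detector_name in …: return instrument' loop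
def pvLoopA (detector_name : String) : List (String × List String) → Option String
  | [] => none
  | (instrument, dets) :: rest =>
      if dets.contains detector_name then some instrument
      else pvLoopA detector_name rest

def get_instrument_from_detector_name (detector_name : String) : Option String :=
  pvLoopA detector_name pvInstrumentDetectorName

-- ===== PORT B =====
-- flat reverse-lookup dict, one keyed .get
def pvDetectorToInstrument : PySem.Dict String String :=
  PySem.Dict.ofList [("nrca1", "NIRCam"), ("nrca2", "NIRCam"), ("nrca3", "NIRCam"), ("nrca4", "NIRCam"),
   ("nrcalong", "NIRCam"), ("nrcb1", "NIRCam"), ("nrcb2", "NIRCam"), ("nrcb3", "NIRCam"),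
   ("nrcb4", "NIRCam"), ("nrcblong", "NIRCam"), ("mirimage", "MIRI")]

def get_instrument_from_detector_name_alt (detector_name : String) : Option String :=
  PySem.Dict.get? pvDetectorToInstrument detector_name

-- ===== PRECONDITION & SPEC =====
def Spec_get_instrument_from_detector_name (detector_name : String) (out : Option String) : Prop := out = get_instrument_from_detector_name_alt detector_name
instance (detector_name : String) (out : Option String) : Decidable (Spec_get_instrument_from_detector_name detector_name out) := by unfold Spec_get_instrument_from_detector_name; infer_instance

-- ===== CLAIM (what is proved, stated in full; the proofs are below) =====
def Claim_equal_get_instrument_from_detector_name : Prop := ∀ (detector_name : String), Dom_get_instrument_from_detector_name detector_name → Spec_get_instrument_from_detector_name detector_name (get_instrument_from_detector_name detector_name)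

-- ===== LEMMAS AND PROOFS =====

-- ===== VERDICT (by name: the statement is the Claim_ definition above) =====
theorem get_instrument_from_detector_name_spec : Claim_equal_get_instrument_from_detector_name := by
  intro d _
  unfold Spec_get_instrument_from_detector_name
  rcases eq_or_ne d "nrca1" with h | h1
  · subst h; decide
  rcases eq_or_ne d "nrca2" with h | h2
  · subst h; decide
  rcases eq_or_ne d "nrca3" with h | h3
  · subst h; decide
  rcases eq_or_ne d "nrca4" with h | h4
  · subst h; decide
  rcases eq_or_ne d "nrcalong" with h | h5
  · subst h; decide
  rcases eq_or_ne d "nrcb1" with h | h6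
  · subst h; decide
  rcases eq_or_ne d "nrcb2" with h | h7
  · subst h; decide
  rcases eq_or_ne d "nrcb3" with h | h8
  · subst h; decide
  rcases eq_or_ne d "nrcb4" with h | h9
  · subst h; decide
  rcases eq_or_ne d "nrcblong" with h | h10
  · subst h; decide
  rcases eq_or_ne d "mirimage" with h | h11
  · subst h; decide
  have hD : pvDetectorToInstrument = PySem.Dict.mk
      [("nrca1", "NIRCam"), ("nrca2", "NIRCam"), ("nrca3", "NIRCam"), ("nrca4", "NIRCam"),
       ("nrcalong", "NIRCam"), ("nrcb1", "NIRCam"), ("nrcb2", "NIRCam"), ("nrcb3", "NIRCam"),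
       ("nrcb4", "NIRCam"), ("nrcblong", "NIRCam"), ("mirimage", "MIRI")] := by decide
  simp [get_instrument_from_detector_name, get_instrument_from_detector_name_alt,
    pvLoopA, pvInstrumentDetectorName, hD, PySem.Dict.get?_mk_cons, PySem.Dict.get?,
    h1, h2, h3, h4, h5, h6, h7, h8, h9, h10, h11, Ne.symm]
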